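-- pv_equiv track=rewrite | github.com/harshthakar002/AoC2025 | 6/2.py | getNumberList
-- ===== SOURCE A (Python) =====
-- def getNumberList(matrix):
--     numbers = [[]]
--     n = 0
--     for row in matrix:
--         srow = row.strip()
--         if srow == '':
--             numbers.append([])
--             n += 1
--         else:
--             numbers[n].append(int(row))
--     return numbers
-- ===== SOURCE B (Python) =====
-- def _first_blank(matrix):
--     for i, row in enumerate(matrix):
--         if row.strip() == '':
--             return i
--     return None
--
--
-- def getNumberList(matrix):
--     i = _first_blank(matrix)
--     if i is None:
--         return [[int(r) for r in matrix]]
--     return [[int(r) for r in matrix[:i]]] + getNumberList(matrix[i + 1:])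
-- ===== Notes on version B (the rewrite author's own statement) =====
-- stated objective: alternative
-- what changed: B is a recursive divide-at-first-separator decomposition: it scans for the first blank row, emits the parsed prefix as one group and recurses on the suffix, instead of A's single imperative fold that appends into the group at a running index n.
import Mathlib
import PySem

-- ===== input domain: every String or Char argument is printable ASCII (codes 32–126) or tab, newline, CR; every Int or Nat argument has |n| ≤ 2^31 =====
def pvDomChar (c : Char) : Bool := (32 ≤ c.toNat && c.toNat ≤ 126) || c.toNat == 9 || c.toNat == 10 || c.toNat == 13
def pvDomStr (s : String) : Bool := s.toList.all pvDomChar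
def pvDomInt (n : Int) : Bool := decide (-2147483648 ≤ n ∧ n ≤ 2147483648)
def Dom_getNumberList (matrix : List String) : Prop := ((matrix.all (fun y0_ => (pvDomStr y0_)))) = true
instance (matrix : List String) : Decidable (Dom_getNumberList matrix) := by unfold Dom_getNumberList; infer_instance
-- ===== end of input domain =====

-- B replaces A's single imperative fold (appending at a running group index) by a recursive
-- divide-at-first-separator decomposition (objective: alternative).

-- ===== PORT A =====
-- one step of A's loop: state = (numbers, n); numbers[n].append via List.modify at index n
def pvAStep (st : List (List Int) × Nat) (row : String) : List (List Int) × Nat :=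
  if PySem.Str.strip row == "" then (st.1 ++ [[]], st.2 + 1)
  else (st.1.modify st.2 (· ++ [(PySem.Int.ofStr? row).getD 0]), st.2)

def getNumberList (matrix : List String) : List (List Int) :=
  (matrix.foldl pvAStep ([[]], 0)).1

-- ===== PORT B =====
-- _first_blank: index of the first row whose strip() is '', else None
def pvFirstBlank : List String → Option Nat
  | [] => none
  | r :: rs => if PySem.Str.strip r == "" then some 0 else (pvFirstBlank rs).map (· + 1)

-- termination fact for the recursion on matrix[i+1:]
lemma pvFirstBlank_pos {matrix : List String} {i : Nat}
    (h : pvFirstBlank matrix = some i) : 0 < matrix.length := by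
  cases matrix with
  | nil => simp [pvFirstBlank] at h
  | cons r rs => simp

-- matrix[:i] and matrix[i+1:] with 0 ≤ i < len(matrix) are exactly take i / drop (i+1)
def getNumberList_alt (matrix : List String) : List (List Int) :=
  match h : pvFirstBlank matrix with
  | none => [matrix.map (fun r => (PySem.Int.ofStr? r).getD 0)]
  | some i =>
      [(matrix.take i).map (fun r => (PySem.Int.ofStr? r).getD 0)]
        ++ getNumberList_alt (matrix.drop (i + 1))
termination_by matrix.length
decreasing_by
  have := pvFirstBlank_pos h
  simp only [List.length_drop]
  omega

-- ===== PRECONDITION & SPEC =====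
-- Pre_ excludes exactly the inputs where Python A raises ValueError: a non-blank row that
-- int() cannot parse (B raises there too).
def Pre_getNumberList (matrix : List String) : Prop :=
  ∀ s ∈ matrix, PySem.Str.strip s ≠ "" → (PySem.Int.ofStr? s).isSome
instance (matrix : List String) : Decidable (Pre_getNumberList matrix) := by
  unfold Pre_getNumberList; infer_instance

def pvWitness_getNumberList : List String := [" 1 ", "", "-2", "  ", "", "3"]

def Spec_getNumberList (matrix : List String) (out : List (List Int)) : Prop := out = getNumberList_alt matrix
instance (matrix : List String) (out : List (List Int)) : Decidable (Spec_getNumberList matrix out) := by unfold Spec_getNumberList; infer_instance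

-- ===== CLAIM (what is proved, stated in full; the proofs are below) =====
def Claim_equal_getNumberList : Prop := ∀ (matrix : List String), Dom_getNumberList matrix → Pre_getNumberList matrix → Spec_getNumberList matrix (getNumberList matrix)

-- ===== LEMMAS AND PROOFS =====

-- proof-side one-step characterisation of the grouping, shared shape for both ports
def pvStep (g : List (List Int)) (row : String) : List (List Int) :=
  if PySem.Str.strip row == "" then [] :: g
  else ((PySem.Int.ofStr? row).getD 0 :: g.headI) :: g.tail

def pvF (l : List String) : List (List Int) := l.foldr (fun row g => pvStep g row) [[]]

lemma pvF_ne_nil (l : List String) : pvF l ≠ [] := by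
  cases l with
  | nil => simp [pvF]
  | cons r rs => simp only [pvF, List.foldr, pvStep]; split <;> simp

lemma modify_append_length {α : Type} (nums : List α) (g : α) (f : α → α) :
    (nums ++ [g]).modify nums.length f = nums ++ [f g] := by
  induction nums with
  | nil => simp [List.modify]
  | cons a as ih => simpa [List.modify] using ih

lemma pvA_foldl_key (l : List String) : ∀ (nums : List (List Int)) (g : List Int),
    (l.foldl pvAStep (nums ++ [g], nums.length)).1
      = nums ++ ((g ++ (pvF l).headI) :: (pvF l).tail) := by
  induction l with
  | nil => intro nums g; simp [pvF]
  | cons r rs ih =>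
    intro nums g
    rw [List.foldl_cons]
    obtain ⟨a, t, hF⟩ : ∃ a t, pvF rs = a :: t := by
      cases hF : pvF rs with
      | nil => exact absurd hF (pvF_ne_nil rs)
      | cons a t => exact ⟨a, t, rfl⟩
    by_cases h : PySem.Str.strip r == ""
    · rw [show pvAStep (nums ++ [g], nums.length) r
          = ((nums ++ [g]) ++ [[]], (nums ++ [g]).length) from by simp [pvAStep, h]]
      rw [ih (nums ++ [g]) []]
      rw [show pvF (r :: rs) = [] :: pvF rs from by
        simp only [pvF, List.foldr, pvStep, h, if_pos]]
      simp [hF]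
    · rw [show pvAStep (nums ++ [g], nums.length) r
          = (nums ++ [g ++ [(PySem.Int.ofStr? r).getD 0]], nums.length) from by
        simp only [pvAStep, h, Bool.false_eq_true, if_neg, not_false_iff]
        rw [modify_append_length]]
      rw [ih nums (g ++ [(PySem.Int.ofStr? r).getD 0])]
      rw [show pvF (r :: rs)
          = ((PySem.Int.ofStr? r).getD 0 :: (pvF rs).headI) :: (pvF rs).tail from by
        simp only [pvF, List.foldr, pvStep, h, Bool.false_eq_true, if_neg, not_false_iff]]
      simp [hF, List.append_assoc]

-- unfolding equations for getNumberList_alt, by the value of pvFirstBlank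
lemma alt_none {l : List String} (hl : pvFirstBlank l = none) :
    getNumberList_alt l = [l.map (fun r => (PySem.Int.ofStr? r).getD 0)] := by
  rw [getNumberList_alt]
  split
  · rfl
  · rename_i i heq; rw [hl] at heq; simp at heq

lemma alt_some {l : List String} {i : Nat} (hl : pvFirstBlank l = some i) :
    getNumberList_alt l
      = [(l.take i).map (fun r => (PySem.Int.ofStr? r).getD 0)]
        ++ getNumberList_alt (l.drop (i + 1)) := by
  rw [getNumberList_alt]
  split
  · rename_i heq; rw [hl] at heq; simp at heq
  · rename_i j heq
    rw [hl] at heq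
    obtain rfl : i = j := Option.some.inj heq
    rfl

-- B satisfies the same one-step recurrence as pvF
lemma alt_cons (r : String) (rs : List String) :
    getNumberList_alt (r :: rs) = pvStep (getNumberList_alt rs) r := by
  by_cases h : PySem.Str.strip r == ""
  · rw [alt_some (show pvFirstBlank (r :: rs) = some 0 by simp [pvFirstBlank, h])]
    simp [pvStep, h]
  · cases hrs : pvFirstBlank rs with
    | none =>
      rw [alt_none (show pvFirstBlank (r :: rs) = none by simp [pvFirstBlank, h, hrs]),
        alt_none hrs]
      simp [pvStep, h]
    | some i =>
      rw [alt_some (show pvFirstBlank (r :: rs) = some (i + 1) by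
            simp [pvFirstBlank, h, hrs]),
        alt_some hrs]
      simp [pvStep, h, List.take_succ_cons, List.drop_succ_cons]

lemma pvF_eq_alt (l : List String) : pvF l = getNumberList_alt l := by
  induction l with
  | nil => rw [getNumberList_alt]; simp [pvF, pvFirstBlank]
  | cons r rs ih => rw [alt_cons, ← ih]; simp [pvF]

-- ===== VERDICT (by name: the statement is the Claim_ definition above) =====
theorem getNumberList_spec : Claim_equal_getNumberList := by
  intro matrix _ _
  unfold Spec_getNumberList
  rw [← pvF_eq_alt]
  have h := pvA_foldl_key matrix [] []
  simp only [List.nil_append, List.length_nil] at h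
  unfold getNumberList
  rw [h]
  cases hF : pvF matrix with
  | nil => exact absurd hF (pvF_ne_nil matrix)
  | cons a t => simp
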